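-- pv_equiv track=rewrite | github.com/laueste/algorithms-ucsf-2019 | hw1/hw1/counts.py | bubblesort_count
-- ===== SOURCE A (Python) =====
-- def bubblesort_count(x):
--     """
--     This function takes in a list x and sorts it by
--     iterating through the elements pairwise and swapping
--     the order of the pairs according to the sorting rule,
--     repeating this entire process once for each element
--     in the input list
--     """
--     assigments_count = 0
--     conditionals_count = 0
--     for n in range(len(x)):
--         assigments_count += 1
--         for i in range(len(x)-1): #comparing adjacent, so iterate up to 2nd-to-last
--             assigments_count += 1
--             if x[i] > x[i+1]:
--                 conditionals_count +=1
--                 assigments_count += 3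
--                 saveBit = x[i+1]
--                 x[i+1] = x[i]
--                 x[i] = saveBit
--     return x, (assigments_count,conditionals_count)
-- ===== SOURCE B (Python) =====
-- def bubblesort_count(x):
--     """Merge-sort re-implementation: sorts in O(n log n) and derives A's counters
--     from the inversion count (assignments = n*n + 3*inv, conditionals = inv).
--     Mutates x in place (x[:] = sorted contents), like the original."""
--     n = len(x)
--     s, inv = _sort_count(x)
--     x[:] = s
--     return x, (n * n + 3 * inv, inv)
--
--
-- def _sort_count(a):
--     # returns (sorted copy of a, number of inversions in a)
--     if len(a) <= 1:
--         return list(a), 0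
--     mid = len(a) // 2
--     ls, il = _sort_count(a[:mid])
--     rs, ir = _sort_count(a[mid:])
--     merged = []
--     inv = il + ir
--     i = 0
--     j = 0
--     while i < len(ls) and j < len(rs):
--         if rs[j] < ls[i]:
--             merged.append(rs[j])
--             j += 1
--             inv += len(ls) - i
--         else:
--             merged.append(ls[i])
--             i += 1
--     merged += ls[i:]
--     merged += rs[j:]
--     return merged, inv
-- ===== Notes on version B (the rewrite author's own statement) =====
-- stated objective: faster
-- what changed: Replaced the n-pass bubble sort with a top-down merge sort that counts inversions during the merge; the two counters are recovered by the closed formulas assignments = n*n + 3*inv and conditionals = inv.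
import Mathlib
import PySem

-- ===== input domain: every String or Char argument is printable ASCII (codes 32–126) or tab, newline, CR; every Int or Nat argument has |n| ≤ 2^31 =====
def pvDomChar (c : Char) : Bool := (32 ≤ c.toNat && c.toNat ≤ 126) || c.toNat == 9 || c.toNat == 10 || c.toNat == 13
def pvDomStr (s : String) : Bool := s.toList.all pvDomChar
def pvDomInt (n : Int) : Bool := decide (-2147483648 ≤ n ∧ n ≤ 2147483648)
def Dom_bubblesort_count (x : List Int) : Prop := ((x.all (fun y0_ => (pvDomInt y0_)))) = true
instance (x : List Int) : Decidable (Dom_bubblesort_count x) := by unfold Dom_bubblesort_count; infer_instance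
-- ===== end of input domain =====

-- B replaces the n-pass bubble sort by a merge sort counting inversions, deriving A's counters by closed
-- formulas (objective: faster, O(n log n) vs O(n^2)). Both A and B mutate the argument list in place in
-- Python; the equivalence proved here is about the RETURN value (in both cases also the mutated contents).

-- ===== PORT A =====
-- inner-loop body: 'assigments_count += 1; if x[i] > x[i+1]: …swap…' ; indices i, i+1 are always in
-- range (i from range(len(x)-1)), so pyGetD/pySetD are exact here
def pvInnerStep (st : List Int × Int × Int) (i : Int) : List Int × Int × Int :=
  let lst := st.1
  let a := st.2.1 + 1
  let c := st.2.2
  if PySem.List.pyGetD lst i 0 > PySem.List.pyGetD lst (i + 1) 0 then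
    let c := c + 1
    let a := a + 3
    let saveBit := PySem.List.pyGetD lst (i + 1) 0
    let lst := PySem.List.pySetD lst (i + 1) (PySem.List.pyGetD lst i 0)
    let lst := PySem.List.pySetD lst i saveBit
    (lst, a, c)
  else
    (lst, a, c)

-- outer-loop body: 'assigments_count += 1; for i in range(len(x)-1): …'
def pvOuterStep (st : List Int × Int × Int) (_n : Int) : List Int × Int × Int :=
  let st1 := (st.1, st.2.1 + 1, st.2.2)
  (PySem.List.pyRange 0 (PySem.List.len st1.1 - 1) 1).foldl pvInnerStep st1

def bubblesort_count (x : List Int) : List Int × (Int × Int) :=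
  let r := (PySem.List.pyRange 0 (PySem.List.len x) 1).foldl pvOuterStep (x, 0, 0)
  (r.1, (r.2.1, r.2.2))

-- ===== PORT B =====
-- the merge while-loop of Source B, state (i, j, merged, inv); i and j only ever hold 0..len, so Nat
-- indices and List.drop for the trailing slices ls[i:], rs[j:] are exact
def pvMergeGo (ls rs : List Int) (i j : Nat) (merged : List Int) (inv : Int) : List Int × Int :=
  if h : i < ls.length ∧ j < rs.length then
    if rs[j] < ls[i] then
      pvMergeGo ls rs i (j + 1) (merged ++ [rs[j]]) (inv + ((ls.length : Int) - (i : Int)))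
    else
      pvMergeGo ls rs (i + 1) j (merged ++ [ls[i]]) inv
  else
    (merged ++ ls.drop i ++ rs.drop j, inv)
termination_by (ls.length - i) + (rs.length - j)
decreasing_by
  · exact Nat.add_lt_add_left (Nat.sub_succ_lt_self _ _ h.2) _
  · exact Nat.add_lt_add_right (Nat.sub_succ_lt_self _ _ h.1) _

-- _sort_count of Source B; len(a)//2 on the Nat length is Nat division (exact: both floor on
-- nonnegative values), and a[:mid], a[mid:] with 0 ≤ mid ≤ len(a) are take/drop (exact)
def pvSortCount (a : List Int) : List Int × Int :=
  if h : a.length ≤ 1 then (a, 0)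
  else
    let mid := a.length / 2
    let L := pvSortCount (a.take mid)
    let R := pvSortCount (a.drop mid)
    pvMergeGo L.1 R.1 0 0 [] (L.2 + R.2)
termination_by a.length
decreasing_by
  · exact lt_of_le_of_lt (List.length_take_le _ _)
      (Nat.div_lt_self (Nat.pos_of_ne_zero (fun hz => h (by rw [hz]; omega))) Nat.one_lt_two)
  · rw [List.length_drop]
    exact Nat.sub_lt (Nat.pos_of_ne_zero (fun hz => h (by rw [hz]; omega)))
      (Nat.div_pos (by omega) (by omega))

def bubblesort_count_alt (x : List Int) : List Int × (Int × Int) :=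
  let n : Int := PySem.List.len x
  let s := pvSortCount x
  (s.1, (n * n + 3 * s.2, s.2))

-- ===== PRECONDITION & SPEC =====
def Spec_bubblesort_count (x : List Int) (out : List Int × (Int × Int)) : Prop := out = bubblesort_count_alt x
instance (x : List Int) (out : List Int × (Int × Int)) : Decidable (Spec_bubblesort_count x out) := by unfold Spec_bubblesort_count; infer_instance

-- ===== CLAIM (what is proved, stated in full; the proofs are below) =====
def Claim_equal_bubblesort_count : Prop := ∀ (x : List Int), Dom_bubblesort_count x → Spec_bubblesort_count x (bubblesort_count x)

-- ===== LEMMAS AND PROOFS =====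

-- one bubble pass, its swap count, the inversion count, and iterated passes
def pvBpass : List Int → List Int
  | [] => []
  | [a] => [a]
  | a :: b :: t => if b < a then b :: pvBpass (a :: t) else a :: pvBpass (b :: t)

def pvSwaps : List Int → Nat
  | [] => 0
  | [_] => 0
  | a :: b :: t => if b < a then pvSwaps (a :: t) + 1 else pvSwaps (b :: t)

def pvInv : List Int → Nat
  | [] => 0
  | a :: t => t.countP (fun b => decide (b < a)) + pvInv t

def pvIter : Nat → List Int → List Int
  | 0, l => l
  | k + 1, l => pvIter k (pvBpass l)

def pvTotSwaps : Nat → List Int → Nat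
  | 0, _ => 0
  | k + 1, l => pvSwaps l + pvTotSwaps k (pvBpass l)

-- number of pairs (a ∈ l, b ∈ r) with b < a
def pvCross : List Int → List Int → Nat
  | [], _ => 0
  | a :: l, r => r.countP (fun b => decide (b < a)) + pvCross l r

theorem pvBpass_perm (l : List Int) : (pvBpass l).Perm l := by
  fun_induction pvBpass l with
  | case1 => exact List.Perm.refl _
  | case2 a => exact List.Perm.refl _
  | case3 a b t h ih => exact (ih.cons b).trans (List.Perm.swap a b t)
  | case4 a b t h ih => exact ih.cons a


theorem pvBpass_length (l : List Int) : (pvBpass l).length = l.length :=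
  (pvBpass_perm l).length_eq

theorem pv_getD_append_len (p : List Int) (b : Int) (t : List Int) (d : Int) :
    (p ++ b :: t).getD p.length d = b := by
  simp [List.getD_eq_getElem?_getD]

theorem pv_getD_append_len1 (p : List Int) (b c : Int) (t : List Int) (d : Int) :
    (p ++ b :: c :: t).getD (p.length + 1) d = c := by
  simp [List.getD_eq_getElem?_getD]

theorem pv_set_append_len (p : List Int) (b v : Int) (t : List Int) :
    (p ++ b :: t).set p.length v = p ++ v :: t := by
  induction p with
  | nil => rfl
  | cons x p ih => simp [ih]

theorem pv_set_append_len1 (p : List Int) (b c v : Int) (t : List Int) :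
    (p ++ b :: c :: t).set (p.length + 1) v = p ++ b :: v :: t := by
  induction p with
  | nil => rfl
  | cons x p ih => simp [ih]

theorem inner_spec (t : List Int) : ∀ (p : List Int) (b : Int) (a c : Int),
    (PySem.List.pyRange (p.length : Int) ((p.length : Int) + (t.length : Int)) 1).foldl pvInnerStep
      (p ++ b :: t, a, c)
    = (p ++ pvBpass (b :: t), a + (t.length : Int) + 3 * (pvSwaps (b :: t) : Int),
       c + (pvSwaps (b :: t) : Int)) := by
  induction t with
  | nil =>
    intro p b a c
    rw [PySem.List.pyRange_one_eq_nil (by simp)]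
    simp [pvBpass, pvSwaps]
  | cons b' t' ih =>
    intro p b a c
    rw [PySem.List.pyRange_one_cons (by simp only [List.length_cons]; push_cast; omega)]
    have hstep : pvInnerStep (p ++ b :: b' :: t', a, c) (p.length : Int)
        = if b' < b then (p ++ b' :: b :: t', a + 1 + 3, c + 1) else (p ++ b :: b' :: t', a + 1, c) := by
      show pvInnerStep (p ++ b :: b' :: t', a, c) ((p.length : Nat) : Int) = _
      unfold pvInnerStep
      have h1 : ((p.length : Int) + 1) = (((p.length + 1 : Nat)) : Int) := by push_cast; ring
      simp only [h1, PySem.List.pyGetD_natCast, PySem.List.pySetD_natCast,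
        pv_getD_append_len, pv_getD_append_len1]
      by_cases hbb : b' < b
      · simp only [gt_iff_lt, if_pos hbb, pv_set_append_len1, pv_set_append_len]
      · simp only [gt_iff_lt, if_neg hbb]
    rw [List.foldl_cons, hstep]
    by_cases hbb : b' < b
    · rw [if_pos hbb]
      have harg : ((p.length : Int) + 1) = (((p ++ [b']).length : Nat) : Int) := by
        simp
      have hend : ((p.length : Int) + ((b' :: t').length : Int))
          = (((p ++ [b']).length : Nat) : Int) + (t'.length : Int) := by
        simp; ring
      have hlist : p ++ b' :: b :: t' = (p ++ [b']) ++ b :: t' := by simp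
      rw [harg, hend, hlist, ih (p ++ [b']) b (a + 1 + 3) (c + 1)]
      have : pvBpass (b :: b' :: t') = b' :: pvBpass (b :: t') := by
        simp [pvBpass, hbb]
      have hsw : pvSwaps (b :: b' :: t') = pvSwaps (b :: t') + 1 := by
        simp [pvSwaps, hbb]
      rw [this, hsw]
      refine Prod.ext (by simp) (Prod.ext ?_ ?_) <;>
        simp only [List.length_cons] <;> push_cast <;> ring
    · rw [if_neg hbb]
      have harg : ((p.length : Int) + 1) = (((p ++ [b]).length : Nat) : Int) := by
        simp
      have hend : ((p.length : Int) + ((b' :: t').length : Int))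
          = (((p ++ [b]).length : Nat) : Int) + (t'.length : Int) := by
        simp; ring
      have hlist : p ++ b :: b' :: t' = (p ++ [b]) ++ b' :: t' := by simp
      rw [harg, hend, hlist, ih (p ++ [b]) b' (a + 1) c]
      have : pvBpass (b :: b' :: t') = b :: pvBpass (b' :: t') := by
        simp [pvBpass, hbb]
      have hsw : pvSwaps (b :: b' :: t') = pvSwaps (b' :: t') := by
        simp [pvSwaps, hbb]
      rw [this, hsw]
      refine Prod.ext (by simp) (Prod.ext ?_ ?_) <;>
          simp only [List.length_cons] <;> push_cast <;> ring

theorem outer_spec (idxs : List Int) : ∀ (l : List Int) (a c : Int), l ≠ [] →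
    idxs.foldl pvOuterStep (l, a, c)
    = (pvIter idxs.length l,
       a + (idxs.length : Int) * (l.length : Int) + 3 * (pvTotSwaps idxs.length l : Int),
       c + (pvTotSwaps idxs.length l : Int)) := by
  induction idxs with
  | nil => intro l a c _; simp [pvIter, pvTotSwaps]
  | cons n idxs ih =>
    intro l a c hne
    obtain ⟨b, t, rfl⟩ : ∃ b t, l = b :: t := by
      cases l with
      | nil => exact absurd rfl hne
      | cons b t => exact ⟨b, t, rfl⟩
    have hstep : pvOuterStep (b :: t, a, c) n
        = (pvBpass (b :: t), a + 1 + (t.length : Int) + 3 * (pvSwaps (b :: t) : Int),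
           c + (pvSwaps (b :: t) : Int)) := by
      unfold pvOuterStep
      have hr : PySem.List.len (b :: t) - 1 = ((0 : Nat) : Int) + (t.length : Int) := by
        simp [PySem.List.len_eq]
      have h0 : (0 : Int) = (([] : List Int).length : Int) := by simp
      simp only [hr, h0]
      have := inner_spec t [] b (a + 1) c
      simpa using this
    rw [List.foldl_cons, hstep]
    have hbne : pvBpass (b :: t) ≠ [] := by
      have := pvBpass_length (b :: t)
      intro h; rw [h] at this; simp at this
    rw [ih _ _ _ hbne]
    have hlen : (pvBpass (b :: t)).length = t.length + 1 := by
      rw [pvBpass_length]; simp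
    refine Prod.ext (by simp [pvIter]) (Prod.ext ?_ ?_) <;>
      simp only [pvTotSwaps, hlen, List.length_cons] <;> push_cast <;> ring

theorem pass_inv (l : List Int) : pvInv l = pvSwaps l + pvInv (pvBpass l) := by
  fun_induction pvBpass l with
  | case1 => simp [pvInv, pvSwaps]
  | case2 a => simp [pvInv, pvSwaps]
  | case3 a b t h ih =>
    have hc := (pvBpass_perm (a :: t)).countP_eq (fun x => decide (x < b))
    simp only [pvInv, pvSwaps, if_pos h, List.countP_cons] at *
    simp [h, Int.lt_asymm h] at *
    omega
  | case4 a b t h ih =>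
    have hc := (pvBpass_perm (b :: t)).countP_eq (fun x => decide (x < a))
    simp only [pvInv, pvSwaps, if_neg h, List.countP_cons] at *
    simp [h] at *
    omega

theorem tot_inv (k : Nat) (l : List Int) : pvTotSwaps k l + pvInv (pvIter k l) = pvInv l := by
  induction k generalizing l with
  | zero => simp [pvTotSwaps, pvIter]
  | succ k ih =>
    have h1 := ih (pvBpass l)
    have h2 := pass_inv l
    simp only [pvTotSwaps, pvIter]
    omega

theorem pvIter_perm (k : Nat) (l : List Int) : (pvIter k l).Perm l := by
  induction k generalizing l with
  | zero => exact List.Perm.refl _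
  | succ k ih => exact (ih (pvBpass l)).trans (pvBpass_perm l)

theorem pvBpass_last (l : List Int) (hne : l ≠ []) :
    ∃ u M, pvBpass l = u ++ [M] ∧ ∀ y ∈ l, y ≤ M := by
  fun_induction pvBpass l with
  | case1 => exact absurd rfl hne
  | case2 a => exact ⟨[], a, rfl, by simp⟩
  | case3 a b t h ih =>
    obtain ⟨u, M, hu, hle⟩ := ih (by simp)
    refine ⟨b :: u, M, by simp [hu], ?_⟩
    intro y hy
    rcases List.mem_cons.mp hy with rfl | hy
    · exact hle y (List.mem_cons_self)
    · rcases List.mem_cons.mp hy with rfl | hy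
      · exact le_of_lt (lt_of_lt_of_le h (hle a List.mem_cons_self))
      · exact hle y (List.mem_cons_of_mem a hy)
  | case4 a b t h ih =>
    obtain ⟨u, M, hu, hle⟩ := ih (by simp)
    refine ⟨a :: u, M, by simp [hu], ?_⟩
    intro y hy
    rcases List.mem_cons.mp hy with rfl | hy
    · exact le_trans (Int.not_lt.mp h) (hle b List.mem_cons_self)
    · exact hle y hy

theorem pvBpass_append_max (l : List Int) (M : Int) (h : ∀ y ∈ l, y ≤ M) :
    pvBpass (l ++ [M]) = pvBpass l ++ [M] := by
  fun_induction pvBpass l with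
  | case1 => simp [pvBpass]
  | case2 a =>
    have : ¬ M < a := Int.not_lt.mpr (h a List.mem_cons_self)
    simp [pvBpass, this]
  | case3 a b t hba ih =>
    have ih' := ih (by intro y hy; exact h y (by
      rcases List.mem_cons.mp hy with rfl | hy
      · exact List.mem_cons_self
      · exact List.mem_cons_of_mem a (List.mem_cons_of_mem b hy)))
    simp only [List.cons_append, pvBpass, if_pos hba] at *
    rw [ih']
  | case4 a b t hba ih =>
    have ih' := ih (by intro y hy; exact h y (by
      rcases List.mem_cons.mp hy with rfl | hy
      · exact List.mem_cons_of_mem a List.mem_cons_self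
      · exact List.mem_cons_of_mem a (List.mem_cons_of_mem b hy)))
    simp only [List.cons_append, pvBpass, if_neg hba] at *
    rw [ih']

theorem pvIter_nil (k : Nat) : pvIter k [] = [] := by
  induction k with
  | zero => rfl
  | succ k ih => simp only [pvIter, pvBpass]; exact ih

theorem pvIter_append_max (k : Nat) : ∀ (u : List Int) (M : Int), (∀ y ∈ u, y ≤ M) →
    pvIter k (u ++ [M]) = pvIter k u ++ [M] := by
  induction k with
  | zero => intro u M _; rfl
  | succ k ih =>
    intro u M h
    simp only [pvIter]
    rw [pvBpass_append_max u M h]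
    exact ih (pvBpass u) M (fun y hy => h y ((pvBpass_perm u).mem_iff.mp hy))

theorem sorted_iter (k : Nat) (l : List Int) (h : l.length ≤ k) :
    (pvIter k l).Pairwise (· ≤ ·) := by
  induction k generalizing l with
  | zero =>
    have : l = [] := List.eq_nil_of_length_eq_zero (Nat.le_zero.mp h)
    subst this; exact List.Pairwise.nil
  | succ k ih =>
    by_cases hne : l = []
    · subst hne
      show (pvIter k (pvBpass [])).Pairwise (· ≤ ·)
      simp [pvBpass, pvIter_nil]
    · obtain ⟨u, M, hu, hle⟩ := pvBpass_last l hne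
      have hmem : ∀ y ∈ u, y ≤ M := by
        intro y hy
        exact hle y ((pvBpass_perm l).mem_iff.mp (hu ▸ List.mem_append_left [M] hy))
      have hlen : u.length + 1 = l.length := by
        have := pvBpass_length l
        rw [hu] at this; simpa using this
      show (pvIter k (pvBpass l)).Pairwise (· ≤ ·)
      rw [hu, pvIter_append_max k u M hmem]
      rw [List.pairwise_append]
      refine ⟨ih u (by omega), List.pairwise_singleton _ _, ?_⟩
      intro y hy z hz
      rw [List.mem_singleton] at hz
      subst hz
      exact hmem y ((pvIter_perm k u).mem_iff.mp hy)

theorem inv_zero_of_sorted (l : List Int) (h : l.Pairwise (· ≤ ·)) : pvInv l = 0 := by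
  induction l with
  | nil => rfl
  | cons a t ih =>
    rw [List.pairwise_cons] at h
    have h1 : t.countP (fun b => decide (b < a)) = 0 := by
      rw [List.countP_eq_zero]
      intro b hb
      simpa using Int.not_lt.mpr (h.1 b hb)
    simp [pvInv, h1, ih h.2]

theorem A_char (x : List Int) :
    bubblesort_count x
    = (pvIter x.length x, ((x.length : Int) * (x.length : Int) + 3 * (pvInv x : Int), (pvInv x : Int))) := by
  by_cases hne : x = []
  · subst hne
    simp [bubblesort_count, pvIter, pvInv, PySem.List.pyRange_one_eq_nil]
  · have htot : (pvTotSwaps x.length x : Int) = (pvInv x : Int) := by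
      have h1 := tot_inv x.length x
      rw [inv_zero_of_sorted _ (sorted_iter x.length x le_rfl)] at h1
      omega
    unfold bubblesort_count
    rw [PySem.List.len_eq, outer_spec _ _ _ _ hne]
    have hlen : (PySem.List.pyRange 0 (x.length : Int) 1).length = x.length := by
      rw [PySem.List.length_pyRange_one]; simp
    rw [hlen, htot]
    refine Prod.ext rfl (Prod.ext ?_ ?_) <;> simp

-- structural companion of the merge loop
def pvMRec : List Int → List Int → List Int × Nat
  | [], r => (r, 0)
  | l, [] => (l, 0)
  | a :: l, b :: r =>
    if b < a then
      (b :: (pvMRec (a :: l) r).1, (pvMRec (a :: l) r).2 + (l.length + 1))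
    else
      (a :: (pvMRec l (b :: r)).1, (pvMRec l (b :: r)).2)
termination_by l r => l.length + r.length

theorem mergeGo_eq (ls rs : List Int) (i j : Nat) (merged : List Int) (inv : Int) :
    pvMergeGo ls rs i j merged inv
    = (merged ++ (pvMRec (ls.drop i) (rs.drop j)).1,
       inv + ((pvMRec (ls.drop i) (rs.drop j)).2 : Int)) := by
  fun_induction pvMergeGo ls rs i j merged inv with
  | case1 i j merged inv h hlt ih =>
    obtain ⟨hi, hj⟩ := h
    rw [ih]
    rw [List.drop_eq_getElem_cons hi, List.drop_eq_getElem_cons hj]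
    have hrec : pvMRec (ls[i] :: ls.drop (i+1)) (rs[j] :: rs.drop (j+1))
        = (rs[j] :: (pvMRec (ls[i] :: ls.drop (i+1)) (rs.drop (j+1))).1,
           (pvMRec (ls[i] :: ls.drop (i+1)) (rs.drop (j+1))).2 + ((ls.drop (i+1)).length + 1)) := by
      rw [pvMRec]
      simp [hlt]
    rw [hrec]
    have hl : ((ls.drop (i+1)).length + 1 : Nat) = ls.length - i := by
      rw [List.length_drop]; omega
    refine Prod.ext (by simp) ?_
    simp only [hl]
    push_cast [Nat.cast_sub (le_of_lt hi)]
    ring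
  | case2 i j merged inv h hlt ih =>
    obtain ⟨hi, hj⟩ := h
    rw [ih]
    rw [List.drop_eq_getElem_cons hi, List.drop_eq_getElem_cons hj]
    have hrec : pvMRec (ls[i] :: ls.drop (i+1)) (rs[j] :: rs.drop (j+1))
        = (ls[i] :: (pvMRec (ls.drop (i+1)) (rs[j] :: rs.drop (j+1))).1,
           (pvMRec (ls.drop (i+1)) (rs[j] :: rs.drop (j+1))).2) := by
      rw [pvMRec]
      simp [hlt]
    rw [hrec]
    refine Prod.ext (by simp) (by simp)
  | case3 i j merged inv h =>
    rcases Nat.lt_or_ge i ls.length with hi | hi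
    · have hj : rs.length ≤ j := by omega
      have : rs.drop j = [] := List.drop_eq_nil_of_le hj
      rw [this]
      have hrec : pvMRec (ls.drop i) [] = (ls.drop i, 0) := by
        cases h' : ls.drop i with
        | nil => rw [pvMRec]
        | cons a t => rw [pvMRec]; simp
      rw [hrec]
      simp
    · have : ls.drop i = [] := List.drop_eq_nil_of_le hi
      rw [this]
      rw [pvMRec]
      simp

theorem pvMRec_perm (l r : List Int) : (pvMRec l r).1.Perm (l ++ r) := by
  fun_induction pvMRec l r with
  | case1 r => simp
  | case2 l h => simp
  | case3 a l b r h ih => exact (ih.cons b).trans List.perm_middle.symm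
  | case4 a l b r h ih => exact ih.cons a

theorem pvMRec_sorted (l r : List Int) (hl : l.Pairwise (· ≤ ·)) (hr : r.Pairwise (· ≤ ·)) :
    (pvMRec l r).1.Pairwise (· ≤ ·) := by
  fun_induction pvMRec l r with
  | case1 r => exact hr
  | case2 l h => exact hl
  | case3 a l b r hba ih =>
    have hr' := (List.pairwise_cons.mp hr).2
    refine List.pairwise_cons.mpr ⟨?_, ih hl hr'⟩
    intro y hy
    have hy' := (pvMRec_perm (a :: l) r).mem_iff.mp hy
    rcases List.mem_append.mp hy' with hy' | hy'
    · rcases List.mem_cons.mp hy' with rfl | hy'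
      · exact le_of_lt hba
      · exact le_trans (le_of_lt hba) ((List.pairwise_cons.mp hl).1 y hy')
    · exact (List.pairwise_cons.mp hr).1 y hy'
  | case4 a l b r hba ih =>
    have hl' := (List.pairwise_cons.mp hl).2
    refine List.pairwise_cons.mpr ⟨?_, ih hl' hr⟩
    intro y hy
    have hy' := (pvMRec_perm l (b :: r)).mem_iff.mp hy
    rcases List.mem_append.mp hy' with hy' | hy'
    · exact (List.pairwise_cons.mp hl).1 y hy'
    · have hab : a ≤ b := Int.not_lt.mp hba
      rcases List.mem_cons.mp hy' with rfl | hy'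
      · exact hab
      · exact le_trans hab ((List.pairwise_cons.mp hr).1 y hy')

theorem pvCross_nil_right (l : List Int) : pvCross l [] = 0 := by
  induction l with
  | nil => rfl
  | cons a l ih => simp [pvCross, ih]

theorem pvCross_cons_right (l : List Int) (b : Int) (r : List Int) :
    pvCross l (b :: r) = l.countP (fun a => decide (b < a)) + pvCross l r := by
  induction l with
  | nil => simp [pvCross]
  | cons a l ih => simp [pvCross, List.countP_cons, ih]; omega

theorem pvCross_eq_sum (l r : List Int) :
    pvCross l r = (l.map (fun a => r.countP (fun b => decide (b < a)))).sum := by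
  induction l with
  | nil => rfl
  | cons a l ih => simp [pvCross, ih]

theorem pvMRec_cross (l r : List Int) (hl : l.Pairwise (· ≤ ·)) (hr : r.Pairwise (· ≤ ·)) :
    (pvMRec l r).2 = pvCross l r := by
  fun_induction pvMRec l r with
  | case1 r => simp [pvCross]
  | case2 l h => simp [pvCross_nil_right]
  | case3 a l b r hba ih =>
    have hr' := (List.pairwise_cons.mp hr).2
    rw [ih hl hr', pvCross_cons_right]
    have hcount : (a :: l).countP (fun y => decide (b < y)) = l.length + 1 := by
      rw [List.countP_eq_length.mpr]
      · simp
      · intro y hy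
        rcases List.mem_cons.mp hy with rfl | hy
        · simpa using hba
        · simpa using lt_of_lt_of_le hba ((List.pairwise_cons.mp hl).1 y hy)
    omega
  | case4 a l b r hba ih =>
    have hl' := (List.pairwise_cons.mp hl).2
    have hcount : (b :: r).countP (fun y => decide (y < a)) = 0 := by
      rw [List.countP_eq_zero]
      intro y hy
      rcases List.mem_cons.mp hy with rfl | hy
      · simpa using hba
      · have : b ≤ y := (List.pairwise_cons.mp hr).1 y hy
        simpa using Int.not_lt.mpr (le_trans (Int.not_lt.mp hba) this)
    simp only [pvCross, hcount, Nat.zero_add]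
    exact ih hl' hr

theorem pvCross_congr (l l' r r' : List Int) (h1 : l.Perm l') (h2 : r.Perm r') :
    pvCross l r = pvCross l' r' := by
  rw [pvCross_eq_sum, pvCross_eq_sum]
  rw [(h1.map (fun a => r.countP (fun b => decide (b < a)))).sum_eq]
  congr 1
  apply List.map_congr_left
  intro a _
  exact h2.countP_eq _

theorem inv_append (l r : List Int) : pvInv (l ++ r) = pvInv l + pvInv r + pvCross l r := by
  induction l with
  | nil => simp [pvInv, pvCross]
  | cons a l ih => simp [pvInv, pvCross, List.countP_append, ih]; omega

theorem sortCount_spec (a : List Int) :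
    (pvSortCount a).1.Perm a ∧ (pvSortCount a).1.Pairwise (· ≤ ·)
      ∧ (pvSortCount a).2 = (pvInv a : Int) := by
  suffices H : ∀ (n : Nat) (a : List Int), a.length ≤ n →
      (pvSortCount a).1.Perm a ∧ (pvSortCount a).1.Pairwise (· ≤ ·)
        ∧ (pvSortCount a).2 = (pvInv a : Int) from H a.length a le_rfl
  intro n
  induction n with
  | zero =>
    intro a ha
    have : a = [] := List.eq_nil_of_length_eq_zero (Nat.le_zero.mp ha)
    subst this
    rw [pvSortCount]
    exact ⟨List.Perm.refl _, List.Pairwise.nil, by simp [pvInv]⟩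
  | succ n ih =>
    intro a ha
    by_cases hlen : a.length ≤ 1
    · rw [pvSortCount, dif_pos hlen]
      rcases a with _ | ⟨v, t⟩
      · exact ⟨List.Perm.refl _, List.Pairwise.nil, by simp [pvInv]⟩
      · have ht : t = [] := by simpa using hlen
        subst ht
        exact ⟨List.Perm.refl _, List.pairwise_singleton _ _, by simp [pvInv]⟩
    · rw [pvSortCount, dif_neg hlen]
      have htake : (a.take (a.length / 2)).length ≤ n := by
        simp only [List.length_take]; omega
      have hdrop : (a.drop (a.length / 2)).length ≤ n := by
        simp only [List.length_drop]; omega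
      obtain ⟨pL, sL, iL⟩ := ih (a.take (a.length / 2)) htake
      obtain ⟨pR, sR, iR⟩ := ih (a.drop (a.length / 2)) hdrop
      rw [mergeGo_eq]
      simp only [List.drop_zero, List.nil_append]
      have hcross : (pvMRec (pvSortCount (a.take (a.length / 2))).1
            (pvSortCount (a.drop (a.length / 2))).1).2
          = pvCross (a.take (a.length / 2)) (a.drop (a.length / 2)) := by
        rw [pvMRec_cross _ _ sL sR]
        exact pvCross_congr _ _ _ _ pL pR
      refine ⟨?_, ?_, ?_⟩
      · exact (pvMRec_perm _ _).trans ((pL.append pR).trans (by rw [List.take_append_drop]))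
      · exact pvMRec_sorted _ _ sL sR
      · rw [hcross, iL, iR]
        have hia := inv_append (a.take (a.length / 2)) (a.drop (a.length / 2))
        rw [List.take_append_drop] at hia
        rw [hia]
        push_cast
        ring

-- ===== VERDICT (by name: the statement is the Claim_ definition above) =====
theorem bubblesort_count_spec : Claim_equal_bubblesort_count := by
  intro x _
  unfold Spec_bubblesort_count
  obtain ⟨hperm, hsort, hinv⟩ := sortCount_spec x
  have hlist : pvIter x.length x = (pvSortCount x).1 := by
    exact ((pvIter_perm x.length x).trans hperm.symm).eq_of_pairwise
      (fun a b _ _ h1 h2 => le_antisymm h1 h2) (sorted_iter x.length x le_rfl) hsort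
  rw [A_char x]
  unfold bubblesort_count_alt
  simp only [PySem.List.len_eq]
  rw [hlist, hinv]
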